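-- pv_equiv track=rewrite | github.com/pypi-data/pypi-mirror-391 | packages/utilskit/utilskit-0.2.17-py3-none-any.whl/utilskit/timeutils/timeutils.py | get_date_list
-- ===== SOURCE A (Python) =====
-- def get_date_list(year, mon_list, start_day_list, end_day_list):
--     date_list = []
--     for idx, mon in enumerate(mon_list):
--         if mon > 12 or mon < 1:
--             continue
--         start_day = start_day_list[idx]
--         end_day = end_day_list[idx]
--         for dd in range(start_day, end_day+1):
--             if dd > 31 or dd < 1:
--                 continue
--             if mon in [4, 6, 9, 11]:
--                 if dd > 30:
--                     continue
--             if mon == 2: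
--                 if dd > 29:
--                     continue
--             dd = str(dd).zfill(2)
--             mm = str(mon).zfill(2)
--             date_list.append(f'{year}-{mm}-{dd}')
--     date_list.sort()
--     return date_list
-- ===== SOURCE B (Python) =====
-- def get_date_list(year, mon_list, start_day_list, end_day_list):
--     # Counting over the fixed month/day grid: emit each calendar date, in grid order,
--     # as many times as entries cover it -- the output is born sorted (no sort at all).
--     DAYS = [31, 29, 31, 30, 31, 30, 31, 31, 30, 31, 30, 31]  # Feb hard-coded to 29, as in A
--     entries = list(zip(mon_list, start_day_list, end_day_list))
--     out = []
--     for mon in range(1, 13):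
--         mm = str(mon).zfill(2)
--         for dd in range(1, DAYS[mon - 1] + 1):
--             n = sum(1 for m, s, e in entries if m == mon and s <= dd <= e)
--             out.extend([f'{year}-{mm}-{str(dd).zfill(2)}'] * n)
--     return out
-- ===== Notes on version B (the rewrite author's own statement) =====
-- stated objective: alternative
-- what changed: Instead of A's per-entry day loops with a branch cascade followed by a final sort, B walks the fixed 12x31 month/day grid in calendar order and emits each date as many times as the zipped entries cover it, so the output is produced already sorted and no sort runs.
import Mathlib
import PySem

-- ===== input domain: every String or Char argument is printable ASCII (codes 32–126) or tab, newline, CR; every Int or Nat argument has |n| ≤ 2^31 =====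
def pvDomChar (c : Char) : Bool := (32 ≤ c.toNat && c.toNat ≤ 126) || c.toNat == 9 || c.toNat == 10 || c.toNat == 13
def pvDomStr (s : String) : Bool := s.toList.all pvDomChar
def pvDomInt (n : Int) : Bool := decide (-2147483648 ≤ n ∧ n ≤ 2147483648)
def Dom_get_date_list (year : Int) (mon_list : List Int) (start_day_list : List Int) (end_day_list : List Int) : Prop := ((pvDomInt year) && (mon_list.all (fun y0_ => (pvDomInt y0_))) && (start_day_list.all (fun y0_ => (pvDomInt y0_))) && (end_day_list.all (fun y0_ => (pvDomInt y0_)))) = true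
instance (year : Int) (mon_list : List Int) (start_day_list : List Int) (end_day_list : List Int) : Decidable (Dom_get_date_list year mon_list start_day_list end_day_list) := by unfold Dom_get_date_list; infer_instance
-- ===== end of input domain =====

-- B walks the fixed month/day grid in calendar order and emits each date as often as the
-- input entries cover it, so the output is born sorted and no sort runs (objective: alternative).

-- ===== PORT A =====
-- str(n).zfill(2): exact for every str(n) (str(n) is nonempty; a 1-char str(n) is a single digit).
def pvZfill2 (n : Int) : List Char :=
  let cs := PySem.Int.toChars n
  if cs.length < 2 then '0' :: cs else cs

-- f'{year}-{mm}-{dd}' with mm/dd already zfilled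
def pvFmt (year mon dd : Int) : String :=
  String.ofList (PySem.Int.toChars year ++ '-' :: pvZfill2 mon ++ '-' :: pvZfill2 dd)

-- the body of A's outer loop (p = (idx, mon) from enumerate); the .getD 0 is unreachable:
-- pyGet? = none is Python's IndexError, excluded by Pre_get_date_list
def pvBodyA (year : Int) (start_day_list end_day_list : List Int) (acc : List String) (p : Int × Int) : List String :=
  let mon := p.2
  if mon > 12 ∨ mon < 1 then acc
  else
    let start_day := (PySem.List.pyGet? start_day_list p.1).getD 0
    let end_day := (PySem.List.pyGet? end_day_list p.1).getD 0
    (PySem.List.pyRange start_day (end_day + 1) 1).foldl (fun acc2 dd =>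
      if dd > 31 ∨ dd < 1 then acc2
      else if (mon = 4 ∨ mon = 6 ∨ mon = 9 ∨ mon = 11) ∧ dd > 30 then acc2
      else if mon = 2 ∧ dd > 29 then acc2
      else acc2 ++ [pvFmt year mon dd]) acc

def get_date_list (year : Int) (mon_list : List Int) (start_day_list : List Int) (end_day_list : List Int) : List String :=
  PySem.List.sorted
    ((PySem.List.enumerate mon_list 0).foldl (pvBodyA year start_day_list end_day_list) [])
    (fun x => x) false

-- ===== PORT B =====
def pvDays : List Int := [31, 29, 31, 30, 31, 30, 31, 31, 30, 31, 30, 31]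

-- B: for mon in 1..12, for dd in 1..DAYS[mon-1], count the entries covering (mon, dd) and
-- emit that many copies of the formatted date; entries = zip of the three lists.
def get_date_list_alt (year : Int) (mon_list : List Int) (start_day_list : List Int) (end_day_list : List Int) : List String :=
  let entries := (mon_list.zip start_day_list).zip end_day_list
  (PySem.List.pyRange 1 13 1).foldl (fun acc mon =>
    (PySem.List.pyRange 1 (PySem.List.pyGetD pvDays (mon - 1) 0 + 1) 1).foldl (fun acc2 dd =>
      acc2 ++ List.replicate
        (entries.countP (fun q => decide (q.1.1 = mon ∧ q.1.2 ≤ dd ∧ dd ≤ q.2)))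
        (pvFmt year mon dd)) acc) []

-- ===== PRECONDITION & SPEC =====
-- Pre_ excludes exactly the inputs on which A raises IndexError: a month in 1..12 at an index
-- with no corresponding entry in start_day_list or end_day_list.
def Pre_get_date_list (year : Int) (mon_list : List Int) (start_day_list : List Int) (end_day_list : List Int) : Prop :=
  ∀ i < mon_list.length, (1 ≤ mon_list.getD i 0 ∧ mon_list.getD i 0 ≤ 12) →
    i < start_day_list.length ∧ i < end_day_list.length
instance (year : Int) (mon_list : List Int) (start_day_list : List Int) (end_day_list : List Int) : Decidable (Pre_get_date_list year mon_list start_day_list end_day_list) := by unfold Pre_get_date_list; infer_instance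

def pvWitness_get_date_list : Int × List Int × List Int × List Int := (2024, [2, 13], [27, 1], [30, 2])

def Spec_get_date_list (year : Int) (mon_list : List Int) (start_day_list : List Int) (end_day_list : List Int) (out : List String) : Prop := out = get_date_list_alt year mon_list start_day_list end_day_list
instance (year : Int) (mon_list : List Int) (start_day_list : List Int) (end_day_list : List Int) (out : List String) : Decidable (Spec_get_date_list year mon_list start_day_list end_day_list out) := by unfold Spec_get_date_list; infer_instance

-- ===== CLAIM (what is proved, stated in full; the proofs are below) =====
def Claim_equal_get_date_list : Prop := ∀ (year : Int) (mon_list : List Int) (start_day_list : List Int) (end_day_list : List Int), Dom_get_date_list year mon_list start_day_list end_day_list → Pre_get_date_list year mon_list start_day_list end_day_list → Spec_get_date_list year mon_list start_day_list end_day_list (get_date_list year mon_list start_day_list end_day_list)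

-- ===== LEMMAS AND PROOFS =====

-- proof-side abbreviations
def pvDaysOf (m : Int) : Int := PySem.List.pyGetD pvDays (m - 1) 0

-- A's loop over one entry, rewritten with the day range clamped (proof intermediate)
def pvBodyB (year : Int) (acc : List String) (p : (Int × Int) × Int) : List String :=
  let mon := p.1.1
  if 1 ≤ mon ∧ mon ≤ 12 then
    (PySem.List.pyRange (max p.1.2 1) (min p.2 (pvDaysOf mon) + 1) 1).foldl
      (fun acc2 dd => acc2 ++ [pvFmt year mon dd]) acc
  else acc

-- the (month, day) pairs one entry contributes
def pvEntryPairs (q : (Int × Int) × Int) : List (Int × Int) :=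
  if 1 ≤ q.1.1 ∧ q.1.1 ≤ 12 then
    (PySem.List.pyRange (max q.1.2 1) (min q.2 (pvDaysOf q.1.1) + 1) 1).map (fun d => (q.1.1, d))
  else []

-- the calendar grid, in order
def pvGrid : List (Int × Int) :=
  (PySem.List.pyRange 1 13 1).flatMap (fun m =>
    (PySem.List.pyRange 1 (pvDaysOf m + 1) 1).map (fun d => (m, d)))

def pvCnt (entries : List ((Int × Int) × Int)) (p : Int × Int) : Nat :=
  entries.countP (fun q => decide (q.1.1 = p.1 ∧ q.1.2 ≤ p.2 ∧ p.2 ≤ q.2))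

-- the year-free suffix '{mm}-{dd}' of a formatted date
def pvSfx (p : Int × Int) : List Char := pvZfill2 p.1 ++ '-' :: pvZfill2 p.2

-- filtering an integer range by an interval is a clamped range
lemma pv_filter_pyRange (lo hi : Int) : ∀ (n : Nat) (a b : Int), (b - a).toNat = n →
    (PySem.List.pyRange a b 1).filter (fun d => decide (lo ≤ d ∧ d ≤ hi)) =
    PySem.List.pyRange (max a lo) (min b (hi + 1)) 1 := by
  intro n
  induction n with
  | zero =>
    intro a b h
    rw [PySem.List.pyRange_one_eq_nil (by omega), PySem.List.pyRange_one_eq_nil (by omega)]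
    rfl
  | succ k ih =>
    intro a b h
    rw [PySem.List.pyRange_one_cons (by omega), List.filter_cons]
    by_cases hp : lo ≤ a ∧ a ≤ hi
    · rw [if_pos (by simpa using hp), ih (a + 1) b (by omega),
        PySem.List.pyRange_one_cons (a := max a lo) (by omega)]
      have h1 : max a lo = a := by omega
      have h2 : max (a + 1) lo = a + 1 := by omega
      rw [h1, h2]
    · rw [if_neg (by simpa using hp), ih (a + 1) b (by omega)]
      rcases not_and_or.mp hp with h' | h'
      · have : max a lo = max (a + 1) lo := by omega
        rw [this]
      · rw [PySem.List.pyRange_one_eq_nil (by omega), PySem.List.pyRange_one_eq_nil (by omega)]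

-- A's per-day branch cascade is equivalent to dd ∈ [1, DAYS[mon-1]] for a month in 1..12
lemma pv_keep_iff (mon dd : Int) (h1 : 1 ≤ mon) (h2 : mon ≤ 12) :
    (¬ (dd > 31 ∨ dd < 1) ∧ ¬ ((mon = 4 ∨ mon = 6 ∨ mon = 9 ∨ mon = 11) ∧ dd > 30) ∧
      ¬ (mon = 2 ∧ dd > 29)) ↔
    (1 ≤ dd ∧ dd ≤ pvDaysOf mon) := by
  interval_cases mon <;> simp [pvDaysOf, pvDays, PySem.List.pyGetD] <;> omega

-- A's inner loop equals the clamped-range loop for a valid month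
lemma pv_inner_eq (year mon s e : Int) (acc : List String) (h1 : 1 ≤ mon) (h2 : mon ≤ 12) :
    (PySem.List.pyRange s (e + 1) 1).foldl (fun acc2 dd =>
      if dd > 31 ∨ dd < 1 then acc2
      else if (mon = 4 ∨ mon = 6 ∨ mon = 9 ∨ mon = 11) ∧ dd > 30 then acc2
      else if mon = 2 ∧ dd > 29 then acc2
      else acc2 ++ [pvFmt year mon dd]) acc =
    (PySem.List.pyRange (max s 1) (min e (pvDaysOf mon) + 1) 1).foldl
      (fun acc2 dd => acc2 ++ [pvFmt year mon dd]) acc := by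
  have hbody : (fun (acc2 : List String) (dd : Int) =>
      if dd > 31 ∨ dd < 1 then acc2
      else if (mon = 4 ∨ mon = 6 ∨ mon = 9 ∨ mon = 11) ∧ dd > 30 then acc2
      else if mon = 2 ∧ dd > 29 then acc2
      else acc2 ++ [pvFmt year mon dd]) =
      (fun acc2 dd =>
        if 1 ≤ dd ∧ dd ≤ pvDaysOf mon then acc2 ++ [pvFmt year mon dd]
        else acc2) := by
    funext acc2 dd
    have hiff := pv_keep_iff mon dd h1 h2
    by_cases hk : 1 ≤ dd ∧ dd ≤ pvDaysOf mon
    · rcases hiff.mpr hk with ⟨k1, k2, k3⟩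
      rw [if_neg k1, if_neg k2, if_neg k3, if_pos hk]
    · rw [if_neg hk]
      by_cases c1 : dd > 31 ∨ dd < 1
      · rw [if_pos c1]
      · rw [if_neg c1]
        by_cases c2 : (mon = 4 ∨ mon = 6 ∨ mon = 9 ∨ mon = 11) ∧ dd > 30
        · rw [if_pos c2]
        · rw [if_neg c2]
          by_cases c3 : mon = 2 ∧ dd > 29
          · rw [if_pos c3]
          · exact absurd (hiff.mp ⟨c1, c2, c3⟩) hk
  rw [hbody, PySem.List.foldl_append_ite, pv_filter_pyRange _ _ ((e + 1) - s).toNat s (e + 1) rfl,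
    PySem.List.foldl_append_singleton_eq_map]
  have hmin : min (e + 1) (pvDaysOf mon + 1) = min e (pvDaysOf mon) + 1 := by omega
  rw [hmin]

-- pyGet? shifted by one is pyGet? on the tail (for a nonnegative index)
lemma pv_pyGet?_succ_tail (ss : List Int) (s : Int) (hs : 0 ≤ s) :
    PySem.List.pyGet? ss (s + 1) = PySem.List.pyGet? ss.tail s := by
  cases ss with
  | nil => simp [PySem.List.pyGet?]
  | cons x t =>
    rw [PySem.List.pyGet?_of_nonneg _ (by omega), PySem.List.pyGet?_of_nonneg _ hs]
    have h1 : (s + 1).toNat = s.toNat + 1 := by omega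
    simp [h1]

-- shifting the enumeration start by one moves A's loop to the tails of the day lists
lemma pv_shift (year : Int) (ss es : List Int) :
    ∀ (ms : List Int) (s : Int) (acc : List String), 0 ≤ s →
    (PySem.List.enumerate ms (s + 1)).foldl (pvBodyA year ss es) acc =
    (PySem.List.enumerate ms s).foldl (pvBodyA year ss.tail es.tail) acc := by
  intro ms
  induction ms with
  | nil => intro s acc _; simp [PySem.List.enumerate_nil]
  | cons m t ih =>
    intro s acc hs
    rw [PySem.List.enumerate_cons, PySem.List.enumerate_cons, List.foldl_cons, List.foldl_cons,
      ih (s + 1) _ (by omega)]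
    congr 1
    unfold pvBodyA
    rw [pv_pyGet?_succ_tail ss s hs, pv_pyGet?_succ_tail es s hs]

-- A's enumerate-fold is the clamped fold over the zipped entries (under Pre_)
lemma pv_outer_eq (year : Int) :
    ∀ (ms ss es : List Int) (acc : List String),
    (∀ i < ms.length, (1 ≤ ms.getD i 0 ∧ ms.getD i 0 ≤ 12) → i < ss.length ∧ i < es.length) →
    (PySem.List.enumerate ms 0).foldl (pvBodyA year ss es) acc =
    ((ms.zip ss).zip es).foldl (pvBodyB year) acc := by
  intro ms
  induction ms with
  | nil => intro ss es acc _; simp [PySem.List.enumerate_nil]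
  | cons m t ih =>
    intro ss es acc hpre
    have hpre' : ∀ i < t.length, (1 ≤ t.getD i 0 ∧ t.getD i 0 ≤ 12) →
        i < ss.tail.length ∧ i < es.tail.length := by
      intro i hi hv
      have h2 := hpre (i + 1) (by simp only [List.length_cons]; omega) (by simpa using hv)
      rw [List.length_tail, List.length_tail]
      omega
    rw [PySem.List.enumerate_cons, List.foldl_cons, pv_shift year ss es t 0 _ (by omega),
      ih ss.tail es.tail _ hpre']
    rcases ss with _ | ⟨x, ss'⟩
    · have hm : ¬ (1 ≤ m ∧ m ≤ 12) := by
        intro hv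
        have := hpre 0 (by simp) (by simpa using hv)
        simp at this
      have : pvBodyA year [] es acc (0, m) = acc := by
        unfold pvBodyA; simp only []
        rw [if_pos (by omega)]
      rw [this]; simp
    · rcases es with _ | ⟨y, es'⟩
      · have hm : ¬ (1 ≤ m ∧ m ≤ 12) := by
          intro hv
          have := hpre 0 (by simp) (by simpa using hv)
          simp at this
        have : pvBodyA year (x :: ss') [] acc (0, m) = acc := by
          unfold pvBodyA; simp only []
          rw [if_pos (by omega)]
        rw [this]; simp
      · simp only [List.zip_cons_cons, List.foldl_cons, List.tail_cons]
        congr 1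
        unfold pvBodyA pvBodyB
        by_cases hv : 1 ≤ m ∧ m ≤ 12
        · rw [if_neg (by omega), if_pos hv]
          simp only [PySem.List.pyGet?_zero_cons, Option.getD_some]
          exact pv_inner_eq year m x y acc hv.1 hv.2
        · rw [if_pos (by omega), if_neg hv]

-- one clamped entry-loop appends the formatted pairs of that entry
lemma pv_bodyB_append (year : Int) (acc : List String) (q : (Int × Int) × Int) :
    pvBodyB year acc q = acc ++ (pvEntryPairs q).map (fun p => pvFmt year p.1 p.2) := by
  unfold pvBodyB pvEntryPairs
  by_cases hv : 1 ≤ q.1.1 ∧ q.1.1 ≤ 12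
  · rw [if_pos hv, if_pos hv, PySem.List.foldl_append_singleton_eq_map, List.map_map]
    rfl
  · rw [if_neg hv, if_neg hv]; simp

-- A's pre-sort list is the formatted flatMap of the entry pairs
lemma pv_A_flatMap (year : Int) (entries : List ((Int × Int) × Int)) (acc : List String) :
    entries.foldl (pvBodyB year) acc =
    acc ++ (entries.flatMap pvEntryPairs).map (fun p => pvFmt year p.1 p.2) := by
  have hb : pvBodyB year = fun acc q => acc ++ (pvEntryPairs q).map (fun p => pvFmt year p.1 p.2) := by
    funext acc q; exact pv_bodyB_append year acc q
  rw [hb, PySem.List.foldl_append_eq_flatMap, List.map_flatMap]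

-- B is the formatted grid flatMap of replicated counts
lemma pv_B_flatMap (year : Int) (ms ss es : List Int) :
    get_date_list_alt year ms ss es =
    (pvGrid.flatMap (fun p => List.replicate (pvCnt ((ms.zip ss).zip es) p) p)).map
      (fun p => pvFmt year p.1 p.2) := by
  unfold get_date_list_alt pvGrid
  simp only []
  have hinner : ∀ (mon : Int) (acc : List String),
      (PySem.List.pyRange 1 (PySem.List.pyGetD pvDays (mon - 1) 0 + 1) 1).foldl (fun acc2 dd =>
        acc2 ++ List.replicate
          ((((ms.zip ss).zip es)).countP (fun q => decide (q.1.1 = mon ∧ q.1.2 ≤ dd ∧ dd ≤ q.2)))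
          (pvFmt year mon dd)) acc =
      acc ++ (PySem.List.pyRange 1 (pvDaysOf mon + 1) 1).flatMap (fun dd =>
        List.replicate (pvCnt ((ms.zip ss).zip es) (mon, dd)) (pvFmt year mon dd)) := by
    intro mon acc
    exact PySem.List.foldl_append_eq_flatMap _ _ acc
  have houter : (fun (acc : List String) (mon : Int) =>
      (PySem.List.pyRange 1 (PySem.List.pyGetD pvDays (mon - 1) 0 + 1) 1).foldl (fun acc2 dd =>
        acc2 ++ List.replicate
          ((((ms.zip ss).zip es)).countP (fun q => decide (q.1.1 = mon ∧ q.1.2 ≤ dd ∧ dd ≤ q.2)))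
          (pvFmt year mon dd)) acc) =
      (fun acc mon => acc ++ (PySem.List.pyRange 1 (pvDaysOf mon + 1) 1).flatMap (fun dd =>
        List.replicate (pvCnt ((ms.zip ss).zip es) (mon, dd)) (pvFmt year mon dd))) := by
    funext acc mon
    exact hinner mon acc
  rw [houter, PySem.List.foldl_append_eq_flatMap, List.nil_append, List.flatMap_assoc,
    List.map_flatMap]
  congr 1
  funext m
  rw [List.flatMap_map, List.map_flatMap]
  congr 1
  funext d
  rw [List.map_replicate]

-- membership in the grid
lemma pv_mem_grid (x : Int × Int) :
    x ∈ pvGrid ↔ (1 ≤ x.1 ∧ x.1 ≤ 12 ∧ 1 ≤ x.2 ∧ x.2 ≤ pvDaysOf x.1) := by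
  rcases x with ⟨m, d⟩
  simp only [pvGrid, List.mem_flatMap, List.mem_map, PySem.List.mem_pyRange_one, Prod.mk.injEq]
  constructor
  · rintro ⟨m', ⟨hm1, hm2⟩, d', ⟨hd1, hd2⟩, he1, he2⟩
    subst he1; subst he2
    exact ⟨hm1, by omega, hd1, by omega⟩
  · rintro ⟨h1, h2, h3, h4⟩
    exact ⟨m, ⟨h1, by omega⟩, d, ⟨h3, by omega⟩, rfl, rfl⟩

-- a 0/1 if-sum is countP
lemma pv_sum_ite_eq_countP {α : Type} (p : α → Bool) :
    ∀ (l : List α), (l.map (fun a => if p a then 1 else 0)).sum = l.countP p := by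
  intro l
  induction l with
  | nil => rfl
  | cons a t ih =>
    simp only [List.map_cons, List.sum_cons, List.countP_cons, ih]
    by_cases h : p a = true <;> simp [h] <;> omega

-- summing a pointwise if over a nodup list picks the single element
lemma pv_sum_pick {α : Type} [DecidableEq α] (x : α) (f : α → Nat) :
    ∀ (l : List α), l.Nodup →
    (l.map (fun p => if p = x then f p else 0)).sum = if x ∈ l then f x else 0 := by
  intro l
  induction l with
  | nil => simp
  | cons a t ih =>
    intro hnd
    rcases List.nodup_cons.mp hnd with ⟨ha, ht⟩
    simp only [List.map_cons, List.sum_cons, ih ht, List.mem_cons]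
    by_cases he : a = x
    · subst he
      rw [if_pos rfl, if_neg (fun h => ha h), if_pos (Or.inl rfl)]
      omega
    · rw [if_neg he]
      by_cases hm : x ∈ t
      · rw [if_pos hm, if_pos (Or.inr hm)]; omega
      · rw [if_neg hm, if_neg (by rintro (h | h); exact he h.symm; exact hm h)]

-- count of a pair in one entry's contribution: 1 if the entry covers it, else 0
lemma pv_count_entry (x : Int × Int) (hx : x ∈ pvGrid) (q : (Int × Int) × Int) :
    (pvEntryPairs q).count x =
    (if (q.1.1 = x.1 ∧ q.1.2 ≤ x.2 ∧ x.2 ≤ q.2 : Prop) then 1 else 0) := by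
  rcases x with ⟨x1, x2⟩
  rcases pv_mem_grid (x1, x2) |>.mp hx with ⟨hm1, hm2, hd1, hd2⟩
  simp only at hm1 hm2 hd1 hd2
  unfold pvEntryPairs
  by_cases hv : 1 ≤ q.1.1 ∧ q.1.1 ≤ 12
  · rw [if_pos hv, List.count_eq_countP, List.countP_map]
    by_cases he : q.1.1 = x1
    · subst he
      have hpred : ((fun p => (p == ((q.1.1, x2) : Int × Int) : Bool)) ∘ fun d => (q.1.1, d)) =
          fun d => (d == x2 : Bool) := by
        funext d
        by_cases hd : d = x2 <;> simp [Function.comp, hd]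
      rw [hpred, ← List.count_eq_countP]
      by_cases hc : x2 ∈ PySem.List.pyRange (max q.1.2 1) (min q.2 (pvDaysOf q.1.1) + 1) 1
      · rw [List.count_eq_one_of_mem (PySem.List.nodup_pyRange_one _ _) hc]
        rw [PySem.List.mem_pyRange_one] at hc
        rw [if_pos ⟨rfl, by omega, by omega⟩]
      · rw [List.count_eq_zero_of_not_mem hc]
        rw [PySem.List.mem_pyRange_one] at hc
        rw [if_neg]
        rintro ⟨-, e2, e3⟩
        exact hc ⟨by omega, by omega⟩
    · rw [List.countP_eq_zero.mpr, if_neg (fun h => he h.1)]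
      intro d hd
      simp only [Function.comp, beq_iff_eq, Prod.mk.injEq]
      intro hcon
      exact he hcon.1
  · rw [if_neg (by intro h; exact hv (by omega)), List.count_nil,
      if_neg (by rintro ⟨h1, -, -⟩; exact hv ⟨by omega, by omega⟩)]

-- the grid has no duplicates
set_option maxRecDepth 40000 in
set_option maxHeartbeats 2000000 in
lemma pv_grid_nodup : pvGrid.Nodup := by decide

-- the two flatMaps are permutations of each other
lemma pv_perm (entries : List ((Int × Int) × Int)) :
    (pvGrid.flatMap (fun p => List.replicate (pvCnt entries p) p)).Perm
    (entries.flatMap pvEntryPairs) := by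
  rw [List.perm_iff_count]
  intro x
  rw [List.count_flatMap, List.count_flatMap]
  by_cases hx : x ∈ pvGrid
  · have h1 : (pvGrid.map (List.count x ∘ fun p => List.replicate (pvCnt entries p) p)).sum =
        pvCnt entries x := by
      have : (List.count x ∘ fun p => List.replicate (pvCnt entries p) p) =
          fun p => if p = x then pvCnt entries p else 0 := by
        funext p
        simp [List.count_replicate]
      rw [this, pv_sum_pick x (pvCnt entries) pvGrid pv_grid_nodup, if_pos hx]
    have h2 : (entries.map (List.count x ∘ pvEntryPairs)).sum = pvCnt entries x := by
      have : (List.count x ∘ pvEntryPairs) =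
          fun q => if (q.1.1 = x.1 ∧ q.1.2 ≤ x.2 ∧ x.2 ≤ q.2 : Prop) then 1 else 0 := by
        funext q
        exact pv_count_entry x hx q
      have hmap : (fun (q : (Int × Int) × Int) =>
          if (q.1.1 = x.1 ∧ q.1.2 ≤ x.2 ∧ x.2 ≤ q.2 : Prop) then (1 : Nat) else 0) =
          fun q => if (decide (q.1.1 = x.1 ∧ q.1.2 ≤ x.2 ∧ x.2 ≤ q.2) : Bool) then 1 else 0 := by
        funext q
        by_cases h : (q.1.1 = x.1 ∧ q.1.2 ≤ x.2 ∧ x.2 ≤ q.2) <;> simp [h]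
      rw [this, hmap, pv_sum_ite_eq_countP]
      rfl
    rw [h1, h2]
  · have h1 : ∀ p ∈ pvGrid, (List.count x ∘ fun p => List.replicate (pvCnt entries p) p) p = 0 := by
      intro p hp
      simp only [Function.comp, List.count_replicate]
      rw [if_neg]
      intro h
      exact hx (by rwa [(beq_iff_eq).mp h] at hp)
    have h2 : ∀ q ∈ entries, (List.count x ∘ pvEntryPairs) q = 0 := by
      intro q hq
      simp only [Function.comp]
      rw [List.count_eq_zero]
      intro hmem
      apply hx
      unfold pvEntryPairs at hmem
      by_cases hv : 1 ≤ q.1.1 ∧ q.1.1 ≤ 12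
      · rw [if_pos hv] at hmem
        rcases List.mem_map.mp hmem with ⟨d, hd, he⟩
        rw [PySem.List.mem_pyRange_one] at hd
        rw [← he, pv_mem_grid]
        exact ⟨hv.1, hv.2, by omega, by show d ≤ pvDaysOf q.1.1; omega⟩
      · rw [if_neg hv] at hmem
        exact absurd hmem (List.not_mem_nil)
    rw [List.sum_eq_zero (by intro n hn; rcases List.mem_map.mp hn with ⟨p, hp, he⟩; rw [← he]; exact h1 p hp),
      List.sum_eq_zero (by intro n hn; rcases List.mem_map.mp hn with ⟨q, hq, he⟩; rw [← he]; exact h2 q hq)]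

-- zfill(2) is strictly monotone on 1..31 (finite check)
set_option maxRecDepth 40000 in
set_option maxHeartbeats 1000000 in
lemma pv_zfill_mono : ∀ a ∈ PySem.List.pyRange 1 32 1, ∀ b ∈ PySem.List.pyRange 1 32 1,
    a < b → pvZfill2 a < pvZfill2 b := by decide

-- zfill(2) has length 2 on 1..31 (finite check)
set_option maxRecDepth 40000 in
lemma pv_zfill_len : ∀ a ∈ PySem.List.pyRange 1 32 1, (pvZfill2 a).length = 2 := by decide

-- lexicographic step: equal-length-2 strict prefixes decide the comparison
lemma pv_two_lt (c1 c2 e1 e2 : Char) (x y : List Char)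
    (h : ([c1, c2] : List Char) < [e1, e2]) : c1 :: c2 :: x < e1 :: e2 :: y := by
  have h' : List.Lex (· < ·) ([c1, c2] : List Char) [e1, e2] := h
  show List.Lex (· < ·) (c1 :: c2 :: x) (e1 :: e2 :: y)
  cases h' with
  | rel h1 => exact List.Lex.rel h1
  | cons h2 =>
    cases h2 with
    | rel h3 => exact List.Lex.cons (List.Lex.rel h3)
    | cons h4 => cases h4

-- the suffix '{mm}-{dd}' is strictly increasing in calendar order on the grid
lemma pv_sfx_lt (p q : Int × Int) (hp : p ∈ pvGrid) (hq : q ∈ pvGrid)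
    (h : p.1 < q.1 ∨ (p.1 = q.1 ∧ p.2 < q.2)) : pvSfx p < pvSfx q := by
  have hdays : ∀ m, 1 ≤ m → m ≤ 12 → pvDaysOf m ≤ 31 := by decide
  rcases pv_mem_grid p |>.mp hp with ⟨a1, a2, a3, a4⟩
  rcases pv_mem_grid q |>.mp hq with ⟨b1, b2, b3, b4⟩
  have ha31 := hdays p.1 a1 a2
  have hb31 := hdays q.1 b1 b2
  have hmem : ∀ z : Int, 1 ≤ z → z ≤ 31 → z ∈ PySem.List.pyRange 1 32 1 := by
    intro z h1 h2
    rw [PySem.List.mem_pyRange_one]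
    omega
  rcases h with h | ⟨he, hd⟩
  · have hlt := pv_zfill_mono p.1 (hmem _ a1 (by omega)) q.1 (hmem _ b1 (by omega)) h
    have lp := pv_zfill_len p.1 (hmem _ a1 (by omega))
    have lq := pv_zfill_len q.1 (hmem _ b1 (by omega))
    unfold pvSfx
    rcases hzp : pvZfill2 p.1 with _ | ⟨c1, _ | ⟨c2, _ | _⟩⟩ <;> rw [hzp] at lp <;> simp at lp
    rcases hzq : pvZfill2 q.1 with _ | ⟨e1, _ | ⟨e2, _ | _⟩⟩ <;> rw [hzq] at lq <;> simp at lq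
    rw [hzp, hzq] at hlt
    exact pv_two_lt c1 c2 e1 e2 _ _ hlt
  · unfold pvSfx
    rw [he]
    have hlt := pv_zfill_mono p.2 (hmem _ a3 (by omega)) q.2 (hmem _ b3 (by omega)) hd
    exact List.append_left_lt (List.cons_lt_cons_self.mpr hlt)

-- the formatted grid flatMap is sorted
lemma pv_fmt_le_of_sfx_lt (year : Int) (p q : Int × Int) (h : pvSfx p < pvSfx q) :
    pvFmt year p.1 p.2 ≤ pvFmt year q.1 q.2 := by
  apply le_of_lt
  unfold pvSfx at h
  apply String.lt_iff_toList_lt.mpr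
  unfold pvFmt
  rw [String.toList_ofList, String.toList_ofList]
  have e1 : ∀ (z1 z2 : List Char), PySem.Int.toChars year ++ '-' :: z1 ++ '-' :: z2 =
      (PySem.Int.toChars year ++ ['-']) ++ (z1 ++ '-' :: z2) := by
    intro z1 z2
    simp
  rw [e1, e1]
  exact List.append_left_lt h

lemma pv_sorted_out (year : Int) (entries : List ((Int × Int) × Int)) :
    ((pvGrid.flatMap (fun p => List.replicate (pvCnt entries p) p)).map
      (fun p => pvFmt year p.1 p.2)).Pairwise (· ≤ ·) := by
  rw [List.map_flatMap]
  rw [List.pairwise_flatMap]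
  constructor
  · intro p _
    rw [List.map_replicate, List.pairwise_replicate]
    right; exact le_refl _
  · have hgp : pvGrid.Pairwise (fun p q => p.1 < q.1 ∨ (p.1 = q.1 ∧ p.2 < q.2)) := by
      unfold pvGrid
      rw [List.pairwise_flatMap]
      constructor
      · intro m _
        rw [List.pairwise_map]
        apply (PySem.List.pairwise_lt_pyRange_one _ _).imp
        intro a b hab
        right; exact ⟨rfl, hab⟩
      · apply (PySem.List.pairwise_lt_pyRange_one _ _).imp_of_mem
        intro m m' _ _ hmm x hx y hy
        rcases List.mem_map.mp hx with ⟨d, _, he1⟩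
        rcases List.mem_map.mp hy with ⟨d', _, he2⟩
        rw [← he1, ← he2]
        left; exact hmm
    have hgp2 : pvGrid.Pairwise (fun p q => pvFmt year p.1 p.2 ≤ pvFmt year q.1 q.2) := by
      apply hgp.imp_of_mem
      intro p q hp hq h
      exact pv_fmt_le_of_sfx_lt year p q (pv_sfx_lt p q hp hq h)
    apply hgp2.imp_of_mem
    intro p q _ _ h x hx y hy
    rw [List.map_replicate] at hx hy
    rw [List.eq_of_mem_replicate hx, List.eq_of_mem_replicate hy]
    exact h

-- ===== VERDICT (by name: the statement is the Claim_ definition above) =====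
theorem get_date_list_spec : Claim_equal_get_date_list := by
  intro year ms ss es _ hpre
  unfold Spec_get_date_list get_date_list
  rw [pv_outer_eq year ms ss es [] hpre, pv_A_flatMap year _ [], List.nil_append,
    pv_B_flatMap year ms ss es]
  exact PySem.List.sorted_id_eq_of_perm_of_pairwise _ _
    ((pv_perm ((ms.zip ss).zip es)).map _) (pv_sorted_out year _)
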